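-- pv_equiv track=rewrite | github.com/NicholasCureton/vibeCodeTest | tools/lft.py | parse_multiedit
-- ===== SOURCE A (Python) =====
-- from typing import List, Optional, Tuple
--
-- def parse_multiedit(content: str) -> List[Tuple[str, str]]:
--     """
--     Parse multiedit content into list of (old_string, new_string) tuples.
--
--     Format:
--     OLD:
--     text to find
--     NEW:
--     replacement text
--     OLD:
--     another text
--     NEW:
--     another replacement
--     """
--     edits = []
--     lines = content.split("\n")
--
--     i = 0
--     while i < len(lines):
--         line = lines[i].strip()
--
--         if line.upper() == "OLD:":
--             # Collect old_string lines until NEW: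
--             old_lines = []
--             i += 1
--             while i < len(lines) and lines[i].strip().upper() != "NEW:":
--                 old_lines.append(lines[i])
--                 i += 1
--             old_string = "\n".join(old_lines)
--
--             # Skip NEW: line
--             if i < len(lines) and lines[i].strip().upper() == "NEW:":
--                 i += 1
--
--             # Collect new_string lines until next OLD: or end
--             new_lines = []
--             while i < len(lines):
--                 if lines[i].strip().upper() == "OLD:":
--                     break
--                 new_lines.append(lines[i])
--                 i += 1
--             new_string = "\n".join(new_lines)
--
--             # Remove trailing newline from new_string if old_string doesn't have one
--             if not old_string.endswith("\n") and new_string.endswith("\n"):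
--                 new_string = new_string[:-1]
--
--             edits.append((old_string, new_string))
--         else:
--             i += 1
--
--     return edits
-- ===== SOURCE B (Python) =====
-- from typing import List, Tuple
--
-- def parse_multiedit(content: str) -> List[Tuple[str, str]]:
--     """Marker-table parse: index every OLD:/NEW: marker line first, then walk the table."""
--     lines = content.split("\n")
--     marks = []  # (line index, is_old)
--     for idx, line in enumerate(lines):
--         s = line.strip().upper()
--         if s == "OLD:":
--             marks.append((idx, True))
--         elif s == "NEW:":
--             marks.append((idx, False))
--
--     edits = []
--     n = len(marks)
--     m = 0
--     while m < n:
--         idx, is_old = marks[m]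
--         if not is_old:
--             m += 1
--             continue
--         # first NEW marker after this OLD (intervening OLDs are swallowed into the old block)
--         m2 = m + 1
--         while m2 < n and marks[m2][1]:
--             m2 += 1
--         if m2 >= n:
--             edits.append(("\n".join(lines[idx + 1:]), ""))
--             break
--         j = marks[m2][0]
--         old = "\n".join(lines[idx + 1:j])
--         # first OLD marker after the NEW bounds the new block (or end of input)
--         m3 = m2 + 1
--         while m3 < n and not marks[m3][1]:
--             m3 += 1
--         end = marks[m3][0] if m3 < n else len(lines)
--         new = "\n".join(lines[j + 1:end])
--         if not old.endswith("\n") and new.endswith("\n"):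
--             new = new[:-1]
--         edits.append((old, new))
--         m = m3
--     return edits
-- ===== Notes on version B (the rewrite author's own statement) =====
-- stated objective: alternative
-- what changed: B first scans the lines once to build an index table of all OLD:/NEW: marker lines, then walks that table emitting edits as slices of the line list, instead of A's single cursor-driven while-loop with nested collection loops.
import Mathlib
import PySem

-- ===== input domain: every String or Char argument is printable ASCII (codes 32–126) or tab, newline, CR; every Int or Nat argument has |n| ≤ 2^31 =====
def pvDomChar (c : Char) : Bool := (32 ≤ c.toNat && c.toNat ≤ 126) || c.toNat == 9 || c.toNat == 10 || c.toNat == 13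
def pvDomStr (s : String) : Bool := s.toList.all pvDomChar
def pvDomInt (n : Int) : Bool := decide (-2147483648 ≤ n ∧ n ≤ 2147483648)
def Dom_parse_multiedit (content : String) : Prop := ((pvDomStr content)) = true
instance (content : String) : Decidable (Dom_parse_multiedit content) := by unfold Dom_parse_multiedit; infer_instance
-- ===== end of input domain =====

-- B re-parses via a marker-index table built in one scan, then walks the table; alternative decomposition, same cost.

-- ===== PORT A =====
-- shared marker tests and "\n".join, used verbatim by both Pythons
def pvIsOld (l : String) : Bool := PySem.Str.upper (PySem.Str.strip l) == "OLD:"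
def pvIsNew (l : String) : Bool := PySem.Str.upper (PySem.Str.strip l) == "NEW:"
def pvJoin (ls : List String) : String := PySem.Str.join "\n" ls

-- A's inner 'while i < len(lines) and not p(lines[i]): acc.append(lines[i]); i += 1'
def pvCollect (lines : List String) (p : String → Bool) (i : Nat) : List String × Nat :=
  if h : i < lines.length then
    if p lines[i] then ([], i)
    else
      let r := pvCollect lines p (i + 1)
      (lines[i] :: r.1, r.2)
  else ([], i)
termination_by lines.length - i

theorem pvCollect_ge (lines : List String) (p : String → Bool) (i : Nat) :
    i ≤ (pvCollect lines p i).2 := by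
  unfold pvCollect
  split
  · split
    · simp
    · have := pvCollect_ge lines p (i + 1)
      simpa using this.trans' (by omega)
  · simp
termination_by lines.length - i

-- A's outer while-loop, index i over lines
def pvALoop (lines : List String) (i : Nat) : List (String × String) :=
  if h : i < lines.length then
    if pvIsOld lines[i] then
      let oldR := pvCollect lines pvIsNew (i + 1)
      let old_string := pvJoin oldR.1
      let i2 := if h2 : oldR.2 < lines.length then
                  (if pvIsNew lines[oldR.2] then oldR.2 + 1 else oldR.2)
                else oldR.2
      let newR := pvCollect lines pvIsOld i2
      let new_string := pvJoin newR.1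
      let new_string' := if !(PySem.Str.endswith old_string "\n") && PySem.Str.endswith new_string "\n"
                         then PySem.Str.slice new_string none (some (-1)) else new_string
      (old_string, new_string') :: pvALoop lines newR.2
    else pvALoop lines (i + 1)
  else []
termination_by lines.length - i
decreasing_by
  · have h1 := pvCollect_ge lines pvIsNew (i + 1)
    split
    · split
      · have h2 := pvCollect_ge lines pvIsOld ((pvCollect lines pvIsNew (i + 1)).2 + 1); omega
      · have h2 := pvCollect_ge lines pvIsOld ((pvCollect lines pvIsNew (i + 1)).2); omega
    · have h2 := pvCollect_ge lines pvIsOld ((pvCollect lines pvIsNew (i + 1)).2); omega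
  · omega

def parse_multiedit (content : String) : List (String × String) :=
  pvALoop ((PySem.Str.split? content "\n").getD []) 0

-- ===== PORT B =====
-- one scan: indices of all OLD:/NEW: marker lines (from position idx on; B calls it with 0)
def pvMarks (lines : List String) (idx : Nat) : List (Nat × Bool) :=
  if h : idx < lines.length then
    let s := PySem.Str.upper (PySem.Str.strip lines[idx])
    if s == "OLD:" then (idx, true) :: pvMarks lines (idx + 1)
    else if s == "NEW:" then (idx, false) :: pvMarks lines (idx + 1)
    else pvMarks lines (idx + 1)
  else []
termination_by lines.length - idx

-- 'while m2 < n and marks[m2][1]: m2 += 1' — advance past OLD markers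
def pvSkipOld : List (Nat × Bool) → List (Nat × Bool)
  | [] => []
  | (j, b) :: rest => if b then pvSkipOld rest else (j, b) :: rest

-- 'while m3 < n and not marks[m3][1]: m3 += 1' — advance past NEW markers
def pvSkipNew : List (Nat × Bool) → List (Nat × Bool)
  | [] => []
  | (k, b) :: rest => if b then (k, b) :: rest else pvSkipNew rest

theorem pvSkipOld_len (ms : List (Nat × Bool)) : (pvSkipOld ms).length ≤ ms.length := by
  induction ms with
  | nil => simp [pvSkipOld]
  | cons m rest ih => obtain ⟨j, b⟩ := m; simp only [pvSkipOld]; split <;> simp <;> omega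

theorem pvSkipNew_len (ms : List (Nat × Bool)) : (pvSkipNew ms).length ≤ ms.length := by
  induction ms with
  | nil => simp [pvSkipNew]
  | cons m rest ih => obtain ⟨k, b⟩ := m; simp only [pvSkipNew]; split <;> simp <;> omega

-- one table entry reached at top level with marks[m] = OLD: the emitted edit and the remaining table
def pvStep (lines : List String) (idx : Nat) (rest : List (Nat × Bool)) :
    (String × String) × List (Nat × Bool) :=
  match pvSkipOld rest with
  | [] => ((pvJoin (PySem.List.slice lines (some ((idx : Int) + 1)) none), ""), [])
  | (j, _) :: rest2 =>
    let rest3 := pvSkipNew rest2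
    let e : Nat := match rest3 with | (k, _) :: _ => k | [] => lines.length
    let old := pvJoin (PySem.List.slice lines (some ((idx : Int) + 1)) (some (j : Int)))
    let nw := pvJoin (PySem.List.slice lines (some ((j : Int) + 1)) (some (e : Int)))
    let nw' := if !(PySem.Str.endswith old "\n") && PySem.Str.endswith nw "\n"
               then PySem.Str.slice nw none (some (-1)) else nw
    ((old, nw'), rest3)

theorem pvStep_len (lines : List String) (idx : Nat) (rest : List (Nat × Bool)) :
    (pvStep lines idx rest).2.length ≤ rest.length := by
  unfold pvStep
  have h1 := pvSkipOld_len rest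
  cases hs : pvSkipOld rest with
  | nil => simp
  | cons m rest2 =>
    rw [hs] at h1
    have h2 := pvSkipNew_len rest2
    simp at h1 ⊢
    omega

-- walk the marker table
def pvBWalk (lines : List String) (ms : List (Nat × Bool)) : List (String × String) :=
  match ms with
  | [] => []
  | (idx, isOld) :: rest =>
    if isOld then
      let r := pvStep lines idx rest
      r.1 :: pvBWalk lines r.2
    else pvBWalk lines rest
termination_by ms.length
decreasing_by
  · have := pvStep_len lines idx rest
    simp; omega
  · simp

def parse_multiedit_alt (content : String) : List (String × String) :=
  let lines := (PySem.Str.split? content "\n").getD []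
  pvBWalk lines (pvMarks lines 0)

-- ===== PRECONDITION & SPEC =====
def Spec_parse_multiedit (content : String) (out : List (String × String)) : Prop := out = parse_multiedit_alt content
instance (content : String) (out : List (String × String)) : Decidable (Spec_parse_multiedit content out) := by unfold Spec_parse_multiedit; infer_instance

-- ===== CLAIM (what is proved, stated in full; the proofs are below) =====
def Claim_equal_parse_multiedit : Prop := ∀ (content : String), Dom_parse_multiedit content → Spec_parse_multiedit content (parse_multiedit content)

-- ===== LEMMAS AND PROOFS =====

-- first index ≥ i whose line satisfies p (lines.length if none); characterises both A's inner loops and B's skips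
def pvFirst (lines : List String) (p : String → Bool) (i : Nat) : Nat :=
  if h : i < lines.length then
    if p lines[i] then i else pvFirst lines p (i + 1)
  else i
termination_by lines.length - i

theorem pvFirst_step (lines : List String) (p : String → Bool) (i : Nat) (h : i < lines.length) :
    pvFirst lines p i = if p lines[i] then i else pvFirst lines p (i + 1) := by
  rw [pvFirst]; simp [h]

theorem pvFirst_stop (lines : List String) (p : String → Bool) (i : Nat) (h : ¬ i < lines.length) :
    pvFirst lines p i = i := by
  rw [pvFirst]; simp [h]

theorem pvFirst_ge (lines : List String) (p : String → Bool) (i : Nat) : i ≤ pvFirst lines p i := by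
  by_cases h : i < lines.length
  · rw [pvFirst_step lines p i h]
    split
    · omega
    · have := pvFirst_ge lines p (i + 1); omega
  · rw [pvFirst_stop lines p i h]
termination_by lines.length - i

theorem pvFirst_le (lines : List String) (p : String → Bool) (i : Nat) (h : i ≤ lines.length) :
    pvFirst lines p i ≤ lines.length := by
  by_cases h' : i < lines.length
  · rw [pvFirst_step lines p i h']
    split
    · omega
    · exact pvFirst_le lines p (i + 1) (by omega)
  · rw [pvFirst_stop lines p i h']; omega
termination_by lines.length - i

theorem pvFirst_hit (lines : List String) (p : String → Bool) (i : Nat)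
    (hlt : pvFirst lines p i < lines.length) :
    p (lines[pvFirst lines p i]'hlt) = true := by
  by_cases h : i < lines.length
  · by_cases hp : p lines[i]
    · have he : pvFirst lines p i = i := by rw [pvFirst_step lines p i h, if_pos hp]
      simp only [he]; exact hp
    · have he : pvFirst lines p i = pvFirst lines p (i + 1) := by
        rw [pvFirst_step lines p i h, if_neg hp]
      simp only [he] at hlt ⊢
      exact pvFirst_hit lines p (i + 1) hlt
  · have := pvFirst_stop lines p i h; omega
termination_by lines.length - i

theorem pvIsOld_not_new (l : String) (h : pvIsOld l = true) : pvIsNew l = false := by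
  simp only [pvIsOld, beq_iff_eq] at h
  simp [pvIsNew, h]

theorem pvIsNew_not_old (l : String) (h : pvIsNew l = true) : pvIsOld l = false := by
  simp only [pvIsNew, beq_iff_eq] at h
  simp [pvIsOld, h]

theorem pvCollect_eq (lines : List String) (p : String → Bool) (i : Nat) :
    pvCollect lines p i =
      ((lines.drop i).take (pvFirst lines p i - i), pvFirst lines p i) := by
  by_cases h : i < lines.length
  · rw [pvCollect, pvFirst_step lines p i h]
    by_cases hp : p lines[i]
    · simp [h, hp]
    · simp only [dif_pos h, if_neg hp]
      rw [pvCollect_eq lines p (i + 1)]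
      have hge := pvFirst_ge lines p (i + 1)
      have hdrop : lines.drop i = lines[i] :: lines.drop (i + 1) :=
        (List.getElem_cons_drop h).symm
      rw [hdrop]
      have hs : pvFirst lines p (i + 1) - i = (pvFirst lines p (i + 1) - (i + 1)) + 1 := by omega
      rw [hs, List.take_succ_cons]
  · rw [pvCollect, pvFirst_stop lines p i h]; simp [h]
termination_by lines.length - i

theorem pvMarks_none (lines : List String) (i : Nat) (h : ¬ i < lines.length) :
    pvMarks lines i = [] := by
  unfold pvMarks; simp [h]

theorem pvMarks_step (lines : List String) (i : Nat) (h : i < lines.length) :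
    pvMarks lines i =
      if pvIsOld lines[i] then (i, true) :: pvMarks lines (i + 1)
      else if pvIsNew lines[i] then (i, false) :: pvMarks lines (i + 1)
      else pvMarks lines (i + 1) := by
  rw [pvMarks]; simp only [dif_pos h, pvIsOld, pvIsNew]; rfl

theorem pvSkipOld_marks (lines : List String) (i : Nat) :
    pvSkipOld (pvMarks lines i) = pvMarks lines (pvFirst lines pvIsNew i) := by
  by_cases h : i < lines.length
  · rw [pvMarks_step lines i h, pvFirst_step lines pvIsNew i h]
    by_cases ho : pvIsOld lines[i]
    · have hn := pvIsOld_not_new _ ho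
      rw [if_pos ho, if_neg (by simp [hn])]
      simp only [pvSkipOld]
      simpa using pvSkipOld_marks lines (i + 1)
    · by_cases hn : pvIsNew lines[i]
      · rw [if_neg ho, if_pos hn, if_pos hn]
        simp only [pvSkipOld]
        rw [pvMarks_step lines i h, if_neg ho, if_pos hn]
        simp
      · rw [if_neg ho, if_neg hn, if_neg hn]
        exact pvSkipOld_marks lines (i + 1)
  · rw [pvMarks_none lines i h, pvFirst_stop lines pvIsNew i h, pvMarks_none lines i h]; rfl
termination_by lines.length - i

theorem pvSkipNew_marks (lines : List String) (i : Nat) :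
    pvSkipNew (pvMarks lines i) = pvMarks lines (pvFirst lines pvIsOld i) := by
  by_cases h : i < lines.length
  · rw [pvMarks_step lines i h, pvFirst_step lines pvIsOld i h]
    by_cases ho : pvIsOld lines[i]
    · rw [if_pos ho, if_pos ho]
      simp only [pvSkipNew]
      rw [pvMarks_step lines i h, if_pos ho]
      simp
    · by_cases hn : pvIsNew lines[i]
      · rw [if_neg ho, if_pos hn, if_neg ho]
        simp only [pvSkipNew]
        simpa using pvSkipNew_marks lines (i + 1)
      · rw [if_neg ho, if_neg hn, if_neg ho]
        exact pvSkipNew_marks lines (i + 1)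
  · rw [pvMarks_none lines i h, pvFirst_stop lines pvIsOld i h, pvMarks_none lines i h]; rfl
termination_by lines.length - i

-- A's segment between two indices, as pvCollect produces it
def pvSegA (lines : List String) (a b : Nat) : String := pvJoin ((lines.drop a).take (b - a))

-- the shared trailing-newline trim
def pvTrim (old nw : String) : String :=
  if !(PySem.Str.endswith old "\n") && PySem.Str.endswith nw "\n"
  then PySem.Str.slice nw none (some (-1)) else nw

theorem pvTrim_empty (old : String) : pvTrim old "" = "" := by
  unfold pvTrim
  rw [show PySem.Str.endswith "" "\n" = false from by decide]
  simp

theorem pvALoop_stop (lines : List String) (i : Nat) (h : ¬ i < lines.length) :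
    pvALoop lines i = [] := by
  rw [pvALoop]; simp [h]

theorem pvALoop_skip (lines : List String) (i : Nat) (h : i < lines.length)
    (ho : ¬ pvIsOld lines[i] = true) :
    pvALoop lines i = pvALoop lines (i + 1) := by
  rw [pvALoop]; simp only [dif_pos h, if_neg ho]

theorem pvALoop_old (lines : List String) (i : Nat) (h : i < lines.length)
    (ho : pvIsOld lines[i] = true) (i2 : Nat)
    (hi2 : i2 = (if h2 : pvFirst lines pvIsNew (i + 1) < lines.length then
                  (if pvIsNew (lines[pvFirst lines pvIsNew (i + 1)]'h2)
                   then pvFirst lines pvIsNew (i + 1) + 1 else pvFirst lines pvIsNew (i + 1))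
                 else pvFirst lines pvIsNew (i + 1))) :
    pvALoop lines i =
      (pvSegA lines (i + 1) (pvFirst lines pvIsNew (i + 1)),
       pvTrim (pvSegA lines (i + 1) (pvFirst lines pvIsNew (i + 1)))
              (pvSegA lines i2 (pvFirst lines pvIsOld i2))) ::
      pvALoop lines (pvFirst lines pvIsOld i2) := by
  rw [pvALoop]
  simp only [dif_pos h, if_pos ho, pvCollect_eq, pvSegA, pvTrim, hi2]

theorem pvStep_none (lines : List String) (idx : Nat) (rest : List (Nat × Bool))
    (hs : pvSkipOld rest = []) :
    pvStep lines idx rest = ((pvJoin (PySem.List.slice lines (some ((idx : Int) + 1)) none), ""), []) := by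
  unfold pvStep
  rw [hs]

theorem pvStep_cons2 (lines : List String) (idx j k : Nat) (b b2 : Bool)
    (rest rest2 rest4 : List (Nat × Bool))
    (hs : pvSkipOld rest = (j, b) :: rest2)
    (hs3 : pvSkipNew rest2 = (k, b2) :: rest4) :
    pvStep lines idx rest =
      ((pvJoin (PySem.List.slice lines (some ((idx : Int) + 1)) (some (j : Int))),
        pvTrim (pvJoin (PySem.List.slice lines (some ((idx : Int) + 1)) (some (j : Int))))
               (pvJoin (PySem.List.slice lines (some ((j : Int) + 1)) (some (k : Int))))),
       (k, b2) :: rest4) := by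
  unfold pvStep
  rw [hs]
  simp only [hs3, pvTrim]

theorem pvStep_cons3 (lines : List String) (idx j : Nat) (b : Bool)
    (rest rest2 : List (Nat × Bool))
    (hs : pvSkipOld rest = (j, b) :: rest2)
    (hs3 : pvSkipNew rest2 = []) :
    pvStep lines idx rest =
      ((pvJoin (PySem.List.slice lines (some ((idx : Int) + 1)) (some (j : Int))),
        pvTrim (pvJoin (PySem.List.slice lines (some ((idx : Int) + 1)) (some (j : Int))))
               (pvJoin (PySem.List.slice lines (some ((j : Int) + 1)) (some (lines.length : Int))))),
       []) := by
  unfold pvStep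
  rw [hs]
  simp only [hs3, pvTrim]

theorem pvBWalk_nil (lines : List String) : pvBWalk lines [] = [] := by
  rw [pvBWalk]

theorem pvBWalk_new (lines : List String) (idx : Nat) (rest : List (Nat × Bool)) :
    pvBWalk lines ((idx, false) :: rest) = pvBWalk lines rest := by
  rw [pvBWalk]; simp

theorem pvBWalk_old (lines : List String) (idx : Nat) (rest : List (Nat × Bool)) :
    pvBWalk lines ((idx, true) :: rest) =
      (pvStep lines idx rest).1 :: pvBWalk lines (pvStep lines idx rest).2 := by
  rw [pvBWalk]; simp

-- B's slice segments are A's take/drop segments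
theorem pvSeg_cast (lines : List String) (a b : Nat) :
    pvJoin (PySem.List.slice lines (some ((a : Int) + 1)) (some (b : Int))) =
      pvSegA lines (a + 1) b := by
  have hc : ((a : Int) + 1) = (((a + 1 : Nat)) : Int) := by push_cast; ring
  rw [hc, PySem.List.slice_natCast, pvSegA]

theorem pvSeg_cast_tail (lines : List String) (a : Nat) :
    pvJoin (PySem.List.slice lines (some ((a : Int) + 1)) none) =
      pvSegA lines (a + 1) lines.length := by
  have hc : ((a : Int) + 1) = (((a + 1 : Nat)) : Int) := by push_cast; ring
  rw [hc, PySem.List.slice_from_natCast, pvSegA]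
  rw [List.take_of_length_le (by simp)]

theorem pv_main (lines : List String) (i : Nat) :
    pvBWalk lines (pvMarks lines i) = pvALoop lines i := by
  by_cases h : i < lines.length
  · by_cases ho : pvIsOld lines[i]
    · rw [pvMarks_step lines i h, if_pos ho, pvBWalk_old]
      have hj1 : i + 1 ≤ pvFirst lines pvIsNew (i + 1) := pvFirst_ge _ _ _
      have hj2 : pvFirst lines pvIsNew (i + 1) ≤ lines.length := pvFirst_le _ _ _ (by omega)
      by_cases hj : pvFirst lines pvIsNew (i + 1) < lines.length
      · -- a NEW: marker exists at j := pvFirst lines pvIsNew (i+1)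
        have hnewj : pvIsNew (lines[pvFirst lines pvIsNew (i + 1)]'hj) = true := pvFirst_hit _ _ _ hj
        have holdj : pvIsOld (lines[pvFirst lines pvIsNew (i + 1)]'hj) = false := pvIsNew_not_old _ hnewj
        have hsk : pvSkipOld (pvMarks lines (i + 1)) =
            (pvFirst lines pvIsNew (i + 1), false) :: pvMarks lines (pvFirst lines pvIsNew (i + 1) + 1) := by
          rw [pvSkipOld_marks, pvMarks_step lines _ hj, if_neg (by simp [holdj]), if_pos hnewj]
        rw [pvALoop_old lines i h ho (pvFirst lines pvIsNew (i + 1) + 1)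
              (by rw [dif_pos hj, if_pos hnewj])]
        have hk1 : pvFirst lines pvIsNew (i + 1) + 1 ≤ pvFirst lines pvIsOld (pvFirst lines pvIsNew (i + 1) + 1) :=
          pvFirst_ge _ _ _
        have hk2 : pvFirst lines pvIsOld (pvFirst lines pvIsNew (i + 1) + 1) ≤ lines.length :=
          pvFirst_le _ _ _ (by omega)
        by_cases hk : pvFirst lines pvIsOld (pvFirst lines pvIsNew (i + 1) + 1) < lines.length
        · have holdk : pvIsOld (lines[pvFirst lines pvIsOld (pvFirst lines pvIsNew (i + 1) + 1)]'hk) = true :=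
            pvFirst_hit _ _ _ hk
          have hmk : pvMarks lines (pvFirst lines pvIsOld (pvFirst lines pvIsNew (i + 1) + 1)) =
              (pvFirst lines pvIsOld (pvFirst lines pvIsNew (i + 1) + 1), true) ::
              pvMarks lines (pvFirst lines pvIsOld (pvFirst lines pvIsNew (i + 1) + 1) + 1) := by
            rw [pvMarks_step lines _ hk, if_pos holdk]
          rw [pvStep_cons2 lines i (pvFirst lines pvIsNew (i + 1))
                (pvFirst lines pvIsOld (pvFirst lines pvIsNew (i + 1) + 1)) false true
                (pvMarks lines (i + 1)) (pvMarks lines (pvFirst lines pvIsNew (i + 1) + 1))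
                (pvMarks lines (pvFirst lines pvIsOld (pvFirst lines pvIsNew (i + 1) + 1) + 1))
                hsk (by rw [pvSkipNew_marks lines _, hmk])]
          rw [pvSeg_cast, pvSeg_cast, ← hmk]
          rw [pv_main lines (pvFirst lines pvIsOld (pvFirst lines pvIsNew (i + 1) + 1))]
        · have hkn : pvFirst lines pvIsOld (pvFirst lines pvIsNew (i + 1) + 1) = lines.length := by omega
          rw [pvStep_cons3 lines i (pvFirst lines pvIsNew (i + 1)) false
                (pvMarks lines (i + 1)) (pvMarks lines (pvFirst lines pvIsNew (i + 1) + 1))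
                hsk (by rw [pvSkipNew_marks lines _, hkn, pvMarks_none lines _ (by omega)])]
          rw [pvSeg_cast, pvSeg_cast, hkn, pvBWalk_nil, pvALoop_stop lines _ (by omega)]
      · -- no NEW: marker before the end
        have hjn : pvFirst lines pvIsNew (i + 1) = lines.length := by omega
        have hsk : pvSkipOld (pvMarks lines (i + 1)) = [] := by
          rw [pvSkipOld_marks, hjn, pvMarks_none lines _ (by omega)]
        rw [pvStep_none lines i (pvMarks lines (i + 1)) hsk]
        rw [pvALoop_old lines i h ho (pvFirst lines pvIsNew (i + 1)) (by rw [dif_neg hj])]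
        have hseg0 : pvSegA lines (pvFirst lines pvIsNew (i + 1))
            (pvFirst lines pvIsOld (pvFirst lines pvIsNew (i + 1))) = "" := by
          rw [pvFirst_stop lines pvIsOld _ (by omega)]
          simp only [pvSegA, pvJoin, Nat.sub_self, List.take_zero]
          decide
        rw [hseg0, pvTrim_empty, pvSeg_cast_tail, hjn, pvBWalk_nil,
            pvFirst_stop lines pvIsOld _ (by omega), pvALoop_stop lines _ (by omega)]
    · rw [pvALoop_skip lines i h ho]
      rw [pvMarks_step lines i h, if_neg ho]
      by_cases hn : pvIsNew lines[i]
      · rw [if_pos hn, pvBWalk_new]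
        exact pv_main lines (i + 1)
      · rw [if_neg hn]
        exact pv_main lines (i + 1)
  · rw [pvMarks_none lines i h, pvALoop_stop lines i h, pvBWalk_nil]
termination_by lines.length - i

-- ===== VERDICT (by name: the statement is the Claim_ definition above) =====
theorem parse_multiedit_spec : Claim_equal_parse_multiedit := by
  intro content _
  unfold Spec_parse_multiedit parse_multiedit parse_multiedit_alt
  exact (pv_main _ 0).symm
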